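-- pv_equiv track=rewrite | github.com/superchinois/api-gateway | app/query_utils.py | build_query_cash
-- ===== SOURCE A (Python) =====
-- def build_query_cash(itemcodes, year, months):
--     sql_params={
--     'fields':["t0.docdate","t1.itemcode","sum(t1.quantity) as quantity","sum(t1.linetotal) as linetotal", "t1.targettype"],
--     'tables':"dbo.inv1 t1",
--     'where':["t1.itemcode in ({itemcodes})"],
--     'join':{"dbo.oinv t0":('1',["t0.docentry=t1.docentry","year(t0.docdate)='{year}'","month(t0.docdate) in {months}"]),
--              "ocrd _ocrd":('2', ["_ocrd.cardcode=t0.cardcode","(_ocrd.qrygroup1='Y' or _ocrd.qrygroup18='Y')"])},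
--     'groupby':"t0.docdate, t1.itemcode ,t1.targettype",
--     }
--     months_string="("+",".join(["'{}'".format(str(m)) for m in months])+")"
--     stmt=querybuilder(sql_params).format_map({'itemcodes':itemcodes, 'year':year,'months':months_string})
--     return stmt
--
-- def querybuilder(params):
--     keys=['fields', 'tables', 'join','leftjoin', 'where', 'groupby','orderby']
--     keywords={'fields':'{}','tables':'from {}', 'join':'join {} on {}', 'where':'where {}',
--     'groupby':'group by {}', 'orderby':'order by {}', 'leftjoin':"left join {} on {}"}
--     query_tpl="select"
--     for k in keys:
--         if k in params:
--             if k=='join' or k=='leftjoin' :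
--                 for t in sorted(params[k], key=params[k].__getitem__):
--                     on=" and ".join(params[k][t][1])
--                     table=t
--                     query_tpl = " ".join([query_tpl, keywords[k].format(table,on)])
--             elif k=='where':
--                 where=" and ".join(params[k])
--                 query_tpl=" ".join([query_tpl, keywords[k].format(where)])
--             elif k=='fields':
--                 fields=",".join(params[k])
--                 query_tpl=" ".join([query_tpl, fields])
--             else:
--                 query_tpl=" ".join([query_tpl, keywords[k].format(params[k])])
--     return query_tpl
-- ===== SOURCE B (Python) =====
-- def build_query_cash(itemcodes, year, months):
--     # Straight-line assembly: no querybuilder dispatch loop, no template/format_map.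
--     months_string = "(" + ",".join("'{}'".format(m) for m in months) + ")"
--     fields = ",".join(["t0.docdate", "t1.itemcode", "sum(t1.quantity) as quantity",
--                        "sum(t1.linetotal) as linetotal", "t1.targettype"])
--     oinv_on = " and ".join(["t0.docentry=t1.docentry",
--                             "year(t0.docdate)='" + str(year) + "'",
--                             "month(t0.docdate) in " + months_string])
--     ocrd_on = " and ".join(["_ocrd.cardcode=t0.cardcode",
--                             "(_ocrd.qrygroup1='Y' or _ocrd.qrygroup18='Y')"])
--     return ("select " + fields
--             + " from dbo.inv1 t1"
--             + " join dbo.oinv t0 on " + oinv_on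
--             + " join ocrd _ocrd on " + ocrd_on
--             + " where t1.itemcode in (" + itemcodes + ")"
--             + " group by t0.docdate, t1.itemcode ,t1.targettype")
-- ===== Notes on version B (the rewrite author's own statement) =====
-- stated objective: simpler
-- what changed: B drops the generic querybuilder keyword-dispatch loop, the join dict with its sorted() ordering and the format_map template substitution, and assembles the final SQL string directly in one straight-line concatenation with the values inserted in place.
import Mathlib
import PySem

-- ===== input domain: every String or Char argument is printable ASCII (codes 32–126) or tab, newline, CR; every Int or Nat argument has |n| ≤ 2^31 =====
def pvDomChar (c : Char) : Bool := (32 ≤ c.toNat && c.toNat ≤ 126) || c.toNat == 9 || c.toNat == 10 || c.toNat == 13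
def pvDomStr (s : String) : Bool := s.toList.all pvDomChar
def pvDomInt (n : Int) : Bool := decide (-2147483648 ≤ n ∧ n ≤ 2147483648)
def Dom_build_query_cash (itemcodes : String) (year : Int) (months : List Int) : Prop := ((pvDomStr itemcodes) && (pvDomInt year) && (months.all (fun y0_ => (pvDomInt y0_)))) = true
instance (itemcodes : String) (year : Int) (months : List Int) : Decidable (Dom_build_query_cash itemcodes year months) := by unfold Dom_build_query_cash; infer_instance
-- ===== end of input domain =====

set_option maxRecDepth 100000
set_option maxHeartbeats 2000000


-- B replaces A's generic querybuilder keyword-dispatch loop, join dict + sorted() and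
-- format_map template substitution by one straight-line concatenation of the SQL string.

-- ===== PORT A =====

-- the 'join' entry of sql_params: assoc list in insertion order, value = (sort tag, on-conditions)
def sqlJoins : List (String × (String × List String)) :=
  [("dbo.oinv t0", ("1", ["t0.docentry=t1.docentry", "year(t0.docdate)='{year}'", "month(t0.docdate) in {months}"])),
   ("ocrd _ocrd", ("2", ["_ocrd.cardcode=t0.cardcode", "(_ocrd.qrygroup1='Y' or _ocrd.qrygroup18='Y')"]))]

def sqlFields : List String :=
  ["t0.docdate", "t1.itemcode", "sum(t1.quantity) as quantity", "sum(t1.linetotal) as linetotal", "t1.targettype"]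

-- querybuilder, transliterated for the params dict A passes (keys fields/tables/join/where/groupby
-- present, leftjoin/orderby absent, so their 'k in params' tests fail and the iteration adds nothing).
-- sorted(params['join'], key=params['join'].__getitem__) compares the value tuples; Python's str '<'
-- equals Lean's '<' on .toList (code-point order) and the first components decide (they differ), so
-- the key is ported as the value's first component as a char list (exact here).
def querybuilder (fields : List String) (tables : String)
    (joins : List (String × (String × List String))) (whereClauses : List String)
    (groupby : String) : String :=
  List.foldl (fun query_tpl k =>
      if k = "join" then
        List.foldl (fun q t =>
            let on_ := PySem.Str.join " and " t.2.2
            PySem.Str.join " " [q, "join " ++ t.1 ++ " on " ++ on_])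
          query_tpl (PySem.List.sorted joins (fun t => t.2.1.toList) false)
      else if k = "where" then
        PySem.Str.join " " [query_tpl, "where " ++ PySem.Str.join " and " whereClauses]
      else if k = "fields" then
        PySem.Str.join " " [query_tpl, PySem.Str.join "," fields]
      else if k = "tables" then
        PySem.Str.join " " [query_tpl, "from " ++ tables]
      else if k = "groupby" then
        PySem.Str.join " " [query_tpl, "group by " ++ groupby]
      else query_tpl)  -- 'leftjoin', 'orderby': not in params
    "select" ["fields", "tables", "join", "leftjoin", "where", "groupby", "orderby"]

-- hand port of str.format_map, exact for templates with only simple named '{key}' fields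
-- (no '{{'/'}}', no format specs) whose keys are all in the map — true of A's template.
def fmScan : List Char → List (String × String) → List Char
  | [], _ => []
  | c :: rest, env =>
    if c = '{' then
      let key := rest.takeWhile (fun x => x != '}')
      let rest' := (rest.dropWhile (fun x => x != '}')).drop 1
      ((env.lookup (String.ofList key)).getD "").toList ++ fmScan rest' env
    else c :: fmScan rest env
termination_by l _ => l.length
decreasing_by
  · simp only [List.length_cons]
    have h1 : ((rest.dropWhile (fun x => x != '}')).drop 1).length ≤ (rest.dropWhile (fun x => x != '}')).length :=
      by simpa using List.length_drop_le (rest.dropWhile (fun x => x != '}')) 1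
    have h2 := List.length_dropWhile_le (fun x => x != '}') rest
    omega
  · simp

def pyFormatMap (t : String) (env : List (String × String)) : String :=
  String.ofList (fmScan t.toList env)

def build_query_cash (itemcodes : String) (year : Int) (months : List Int) : String :=
  let months_string := "(" ++ PySem.Str.join "," (months.map (fun m => "'" ++ PySem.Int.toStr m ++ "'")) ++ ")"
  let stmt := pyFormatMap
      (querybuilder sqlFields "dbo.inv1 t1" sqlJoins ["t1.itemcode in ({itemcodes})"]
        "t0.docdate, t1.itemcode ,t1.targettype")
      [("itemcodes", itemcodes), ("year", PySem.Int.toStr year), ("months", months_string)]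
  stmt

-- ===== PORT B =====

def build_query_cash_alt (itemcodes : String) (year : Int) (months : List Int) : String :=
  let months_string := "(" ++ PySem.Str.join "," (months.map (fun m => "'" ++ PySem.Int.toStr m ++ "'")) ++ ")"
  let fields := PySem.Str.join "," ["t0.docdate", "t1.itemcode", "sum(t1.quantity) as quantity",
                                    "sum(t1.linetotal) as linetotal", "t1.targettype"]
  let oinv_on := PySem.Str.join " and " ["t0.docentry=t1.docentry",
                                         "year(t0.docdate)='" ++ PySem.Int.toStr year ++ "'",
                                         "month(t0.docdate) in " ++ months_string]
  let ocrd_on := PySem.Str.join " and " ["_ocrd.cardcode=t0.cardcode",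
                                         "(_ocrd.qrygroup1='Y' or _ocrd.qrygroup18='Y')"]
  "select " ++ fields
    ++ " from dbo.inv1 t1"
    ++ " join dbo.oinv t0 on " ++ oinv_on
    ++ " join ocrd _ocrd on " ++ ocrd_on
    ++ " where t1.itemcode in (" ++ itemcodes ++ ")"
    ++ " group by t0.docdate, t1.itemcode ,t1.targettype"

-- ===== PRECONDITION & SPEC =====
def Spec_build_query_cash (itemcodes : String) (year : Int) (months : List Int) (out : String) : Prop := out = build_query_cash_alt itemcodes year months
instance (itemcodes : String) (year : Int) (months : List Int) (out : String) : Decidable (Spec_build_query_cash itemcodes year months out) := by unfold Spec_build_query_cash; infer_instance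

-- ===== CLAIM (what is proved, stated in full; the proofs are below) =====
def Claim_equal_build_query_cash : Prop := ∀ (itemcodes : String) (year : Int) (months : List Int), Dom_build_query_cash itemcodes year months → Spec_build_query_cash itemcodes year months (build_query_cash itemcodes year months)

-- ===== LEMMAS AND PROOFS =====

-- template segments between the placeholders
def segA1 : List Char := "select t0.docdate,t1.itemcode,sum(t1.quantity) as quantity,sum(t1.linetotal) as linetotal,t1.targettype from dbo.inv1 t1 join dbo.oinv t0 on t0.docentry=t1.docentry and year(t0.docdate)='".toList
def segA2 : List Char := "' and month(t0.docdate) in ".toList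
def segA3 : List Char := " join ocrd _ocrd on _ocrd.cardcode=t0.cardcode and (_ocrd.qrygroup1='Y' or _ocrd.qrygroup18='Y') where t1.itemcode in (".toList
def segA4 : List Char := ") group by t0.docdate, t1.itemcode ,t1.targettype".toList


lemma fmScan_clean (p rest : List Char) (env : List (String × String))
    (h : p.all (fun x => x != '{') = true) :
    fmScan (p ++ rest) env = p ++ fmScan rest env := by
  induction p with
  | nil => simp
  | cons a as ih =>
    simp only [List.all_cons, Bool.and_eq_true, bne_iff_ne] at h
    simp only [List.cons_append, fmScan, if_neg h.1]
    rw [ih h.2]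

lemma splitKey (key rest : List Char) (h : key.all (fun x => x != '}') = true) :
    (key ++ '}' :: rest).takeWhile (fun x => x != '}') = key ∧
    (key ++ '}' :: rest).dropWhile (fun x => x != '}') = '}' :: rest := by
  induction key with
  | nil => simp [List.takeWhile, List.dropWhile]
  | cons a as ih =>
    simp only [List.all_cons, Bool.and_eq_true] at h
    simp [List.takeWhile, List.dropWhile, h.1, ih h.2]

lemma fmScan_placeholder (key rest : List Char) (env : List (String × String)) (v : String)
    (hk : key.all (fun x => x != '}') = true)
    (hl : env.lookup (String.ofList key) = some v) :
    fmScan ('{' :: (key ++ '}' :: rest)) env = v.toList ++ fmScan rest env := by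
  have hs := splitKey key rest hk
  simp [fmScan, hs.1, hs.2, hl]

lemma tpl_eq : querybuilder sqlFields "dbo.inv1 t1" sqlJoins ["t1.itemcode in ({itemcodes})"]
    "t0.docdate, t1.itemcode ,t1.targettype" =
    String.ofList (segA1 ++ '{' :: ("year".toList ++ '}' :: (segA2 ++ '{' :: ("months".toList ++ '}' ::
      (segA3 ++ '{' :: ("itemcodes".toList ++ '}' :: segA4)))))) := by
  decide

lemma join3 (sep a b c : String) :
    PySem.Str.join sep [a, b, c] = a ++ (sep ++ (b ++ (sep ++ c))) := by
  apply String.toList_injective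
  simp [PySem.Str.join, PySem.Chars.join, List.intercalate, String.toList_append]

lemma seg1_eq : segA1 = "select ".toList ++ ((PySem.Str.join "," ["t0.docdate", "t1.itemcode", "sum(t1.quantity) as quantity", "sum(t1.linetotal) as linetotal", "t1.targettype"]).toList ++
    (" from dbo.inv1 t1".toList ++ (" join dbo.oinv t0 on ".toList ++
    ("t0.docentry=t1.docentry".toList ++ (" and ".toList ++ "year(t0.docdate)='".toList))))) := by decide

lemma seg2_eq : segA2 = "'".toList ++ (" and ".toList ++ "month(t0.docdate) in ".toList) := by decide

lemma seg3_eq : segA3 = " join ocrd _ocrd on ".toList ++ ((PySem.Str.join " and " ["_ocrd.cardcode=t0.cardcode", "(_ocrd.qrygroup1='Y' or _ocrd.qrygroup18='Y')"]).toList ++ " where t1.itemcode in (".toList) := by decide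

lemma seg4_eq : segA4 = ")".toList ++ " group by t0.docdate, t1.itemcode ,t1.targettype".toList := by decide

lemma main_eq (itemcodes : String) (year : Int) (months : List Int) :
    build_query_cash itemcodes year months = build_query_cash_alt itemcodes year months := by
  apply String.toList_injective
  rw [build_query_cash, build_query_cash_alt]
  rw [pyFormatMap, tpl_eq]
  rw [String.toList_ofList, String.toList_ofList]
  have hofy : String.ofList "year".toList = "year" := by decide
  have hofm : String.ofList "months".toList = "months" := by decide
  have hofi : String.ofList "itemcodes".toList = "itemcodes" := by decide
  rw [fmScan_clean segA1 _ _ (by decide),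
      fmScan_placeholder _ _ _ (PySem.Int.toStr year) (by decide) (by simp [List.lookup, hofy]),
      fmScan_clean segA2 _ _ (by decide),
      fmScan_placeholder _ _ _ ("(" ++ PySem.Str.join "," (months.map (fun m => "'" ++ PySem.Int.toStr m ++ "'")) ++ ")") (by decide) (by simp [List.lookup, hofm]),
      fmScan_clean segA3 _ _ (by decide),
      fmScan_placeholder _ _ _ itemcodes (by decide) (by simp [List.lookup, hofi])]
  have h4 : fmScan segA4 [("itemcodes", itemcodes), ("year", PySem.Int.toStr year),
      ("months", "(" ++ PySem.Str.join "," (months.map (fun m => "'" ++ PySem.Int.toStr m ++ "'")) ++ ")")] = segA4 := by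
    have := fmScan_clean segA4 []
      [("itemcodes", itemcodes), ("year", PySem.Int.toStr year), ("months", "(" ++ PySem.Str.join "," (months.map (fun m => "'" ++ PySem.Int.toStr m ++ "'")) ++ ")")] (by decide)
    simpa [fmScan] using this
  rw [h4, join3, seg1_eq, seg2_eq, seg3_eq, seg4_eq]
  simp only [String.toList_append, List.append_assoc]

-- ===== VERDICT (by name: the statement is the Claim_ definition above) =====
theorem build_query_cash_spec : Claim_equal_build_query_cash := by
  intro itemcodes year months _
  unfold Spec_build_query_cash
  exact main_eq itemcodes year months
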